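-- pv_equiv track=rewrite | github.com/Superb-Man/Cryptography | Extra/Public-Key-Cryptography/AES.py | shiftLeft
-- ===== SOURCE A (Python) =====
-- import copy
--
-- def shiftLeft(mat) :
--     newmat = []
--     for i in range(4) :
--         nrow = copy.copy(mat[i])
--         for j in range (i) :
--             nrow.append(nrow.pop(0))
--         newmat.append(nrow)
--
--     return newmat
-- ===== SOURCE B (Python) =====
-- def shiftLeft(mat):
--     res = []
--     for i in range(4):
--         row = mat[i]
--         k = i % len(row) if row else 0
--         res.append(row[k:] + row[:k])
--     return res
-- ===== Notes on version B (the rewrite author's own statement) =====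
-- stated objective: simpler
-- what changed: Replaces the inner pop(0)/append rotation loop by a direct slice-concatenation rotation (row[k:]+row[:k] with k = i mod len(row)).
import Mathlib
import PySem

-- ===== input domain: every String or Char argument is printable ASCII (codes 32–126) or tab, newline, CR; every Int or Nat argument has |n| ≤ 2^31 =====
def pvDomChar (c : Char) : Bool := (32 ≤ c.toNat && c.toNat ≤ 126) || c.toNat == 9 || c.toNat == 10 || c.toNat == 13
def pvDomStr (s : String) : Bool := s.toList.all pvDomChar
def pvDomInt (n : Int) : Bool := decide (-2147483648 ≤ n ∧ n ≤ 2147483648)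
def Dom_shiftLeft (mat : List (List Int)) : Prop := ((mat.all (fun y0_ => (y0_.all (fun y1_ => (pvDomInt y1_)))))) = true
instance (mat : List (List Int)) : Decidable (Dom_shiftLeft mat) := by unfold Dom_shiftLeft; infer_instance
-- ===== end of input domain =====

-- B replaces the O(i*n) pop(0)/append rotation loop by a direct slice rotation row[k:]+row[:k]: simpler.

-- ===== PORT A =====
-- inner loop: for j in range(i): nrow.append(nrow.pop(0))   (pop on empty row is an IndexError, excluded by Pre_; the port keeps nrow unchanged there)
def shiftLeftRow (nrow : List Int) (i : Nat) : List Int :=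
  (List.range i).foldl (fun nr _ =>
    match PySem.List.pop? nr 0 with
    | some (v, rest) => rest ++ [v]
    | none => nr) nrow

def shiftLeft (mat : List (List Int)) : List (List Int) :=
  (List.range 4).foldl (fun newmat (i : Nat) =>
    let nrow := (PySem.List.pyGet? mat (i : Int)).getD []   -- mat[i]; IndexError excluded by Pre_
    newmat ++ [shiftLeftRow nrow i]) []

-- ===== PORT B =====
def shiftLeft_alt (mat : List (List Int)) : List (List Int) :=
  (List.range 4).foldl (fun res (i : Nat) =>
    let row := (PySem.List.pyGet? mat (i : Int)).getD []    -- mat[i]; IndexError excluded by Pre_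
    let k : Nat := if row.isEmpty then 0 else i % row.length
    res ++ [PySem.List.slice row (some (k : Int)) none ++ PySem.List.slice row none (some (k : Int))]) []

-- ===== PRECONDITION & SPEC =====
-- A raises IndexError when mat has fewer than 4 rows (mat[i]) or when one of rows 1..3 is empty (pop(0)); Pre_ excludes exactly those.
def Pre_shiftLeft (mat : List (List Int)) : Prop :=
  4 ≤ mat.length ∧ ∀ r ∈ (mat.drop 1).take 3, r ≠ []
instance (mat : List (List Int)) : Decidable (Pre_shiftLeft mat) := by unfold Pre_shiftLeft; infer_instance
def pvWitness_shiftLeft : List (List Int) := [[1, 2, 3, 4], [5, 6, 7, 8], [9, 10, 11, 12], [13, 14, 15, 16]]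

def Spec_shiftLeft (mat : List (List Int)) (out : List (List Int)) : Prop := out = shiftLeft_alt mat
instance (mat : List (List Int)) (out : List (List Int)) : Decidable (Spec_shiftLeft mat out) := by unfold Spec_shiftLeft; infer_instance

-- ===== CLAIM (what is proved, stated in full; the proofs are below) =====
def Claim_equal_shiftLeft : Prop := ∀ (mat : List (List Int)), Dom_shiftLeft mat → Pre_shiftLeft mat → Spec_shiftLeft mat (shiftLeft mat)

-- ===== LEMMAS AND PROOFS =====

-- one pass of A's inner loop on a nonempty row is a left rotation by one
theorem shiftLeftRow_step (nr : List Int) (h : nr ≠ []) :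
    (match PySem.List.pop? nr 0 with
      | some (v, rest) => rest ++ [v]
      | none => nr) = nr.rotate 1 := by
  cases nr with
  | nil => exact absurd rfl h
  | cons x xs => simp [PySem.List.pop?_zero_cons, List.rotate_cons_succ]

-- A's inner loop rotates a nonempty row left by i
theorem shiftLeftRow_eq_rotate (nrow : List Int) (h : nrow ≠ []) (i : Nat) :
    shiftLeftRow nrow i = nrow.rotate i := by
  induction i with
  | zero => simp [shiftLeftRow]
  | succ n ih =>
      have hlen : (nrow.rotate n) ≠ [] := by
        intro hc
        exact h (List.eq_nil_of_length_eq_zero (by simpa [List.length_rotate] using congrArg List.length hc))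
      unfold shiftLeftRow at ih ⊢
      rw [List.range_succ, List.foldl_append]
      simp only [List.foldl_cons, List.foldl_nil]
      rw [ih, shiftLeftRow_step _ hlen, List.rotate_rotate]

-- B's slice expression equals A's rotation on any row (for i = 0 also on the empty row)
theorem row_eq (row : List Int) (i : Nat) (h : row ≠ [] ∨ i = 0) :
    PySem.List.slice row (some ((if row.isEmpty then 0 else i % row.length : Nat) : Int)) none ++
      PySem.List.slice row none (some ((if row.isEmpty then 0 else i % row.length : Nat) : Int)) =
    shiftLeftRow row i := by
  rcases eq_or_ne row [] with hr | hr
  · rcases h with h | h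
    · exact absurd hr h
    · subst hr h; simp [shiftLeftRow, PySem.List.slice]
  · have hie : row.isEmpty = false := by simp [hr]
    rw [shiftLeftRow_eq_rotate row hr i, List.rotate_eq_drop_append_take_mod]
    simp only [hie, Bool.false_eq_true, if_false]
    rw [PySem.List.slice_from_natCast, PySem.List.slice_to_natCast]

-- ===== VERDICT (by name: the statement is the Claim_ definition above) =====
theorem shiftLeft_spec : Claim_equal_shiftLeft := by
  intro mat _ hpre
  obtain ⟨hlen, hrows⟩ := hpre
  match mat, hlen with
  | a :: b :: c :: d :: rest, _ =>
    have hb : b ≠ [] := hrows b (by simp)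
    have hc : c ≠ [] := hrows c (by simp)
    have hd : d ≠ [] := hrows d (by simp)
    unfold Spec_shiftLeft shiftLeft shiftLeft_alt
    rw [show List.range 4 = [0, 1, 2, 3] from rfl]
    simp only [List.foldl_cons, List.foldl_nil]
    simp only [PySem.List.pyGet?_natCast, List.getElem?_cons_zero, List.getElem?_cons_succ,
      Option.getD_some]
    rw [row_eq a 0 (Or.inr rfl), row_eq b 1 (Or.inl hb), row_eq c 2 (Or.inl hc),
      row_eq d 3 (Or.inl hd)]
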